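-- pv_equiv track=rewrite | github.com/Simonxtian/MINIPROJEKT_BILLEDEBEHANDLING | Mini-projekt.py | count_tiles_and_crowns
-- ===== SOURCE A (Python) =====
-- def count_tiles_and_crowns(grid, crown_results):
--     def gf_crowns_and_tiles(x, y, visited, category):
--         stack = [(x, y)]
--         tile_count = 0
--         crown_count = 0
--         while stack: #ikke er tom
--             cx, cy = stack.pop() #pop element
--             if (cx, cy) in visited: #hvis elementet er besøgt
--                 continue #så fortsæt
--             visited.add((cx, cy)) #markér elementet som besøgt
--             tile_count += 1 #tæl tiles plus 1
--
--             #Se så om der er en krone i den tile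
--             if crown_results[cx * 5 + cy][2]:  # crown_results contains (i, j, found)
--                 crown_count += 1 #plus en krone
--
--             for nx, ny in [(cx-1, cy), (cx+1, cy), (cx, cy-1), (cx, cy+1)]: #Itererer over alle naboer (venstre, højre, top, bund)
--                 if 0 <= nx < len(grid) and 0 <= ny < len(grid[0]) and grid[nx][ny] == category and (nx, ny) not in visited:
--                     stack.append((nx, ny)) #Tilføj nabo til stacken
--         return tile_count, crown_count #Returnér antallet af tiles og kroner
--
--     visited = set() #besøgte celler
--     results = [] #tom liste til at gemme resultaterne
--     for i in range(len(grid)): #Itererer over alle celler i grid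
--         for j in range(len(grid[0])):
--             if (i, j) not in visited: #Hvis cellen ikke er besøgt
--                 tile_count, crown_count = gf_crowns_and_tiles(i, j, visited, grid[i][j]) #Start grassfire algoritmen
--                 if crown_count > 0:  #Kun clusters med mere end 0 kroner
--                     results.append((tile_count, crown_count, tile_count * crown_count)) #gange gange gange
--
--     return results
-- ===== SOURCE B (Python) =====
-- def count_tiles_and_crowns(grid, crown_results):
--     # Frontier-saturation (level-by-level wave) connected components instead of an
--     # explicit DFS stack; counts are taken from the finished component set.
--     h = len(grid)
--     w = len(grid[0]) if grid else 0
--     visited = set()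
--     results = []
--     for i in range(h):
--         for j in range(w):
--             if (i, j) in visited:
--                 continue
--             cat = grid[i][j]
--             comp = {(i, j)}
--             frontier = [(i, j)]
--             for _ in range(h * w):
--                 new = []
--                 for (x, y) in frontier:
--                     for n in ((x - 1, y), (x + 1, y), (x, y - 1), (x, y + 1)):
--                         if 0 <= n[0] < h and 0 <= n[1] < w and grid[n[0]][n[1]] == cat \
--                            and n not in visited and n not in comp and n not in new:
--                             new.append(n)
--                 if not new:
--                     break
--                 comp.update(new)
--                 frontier = new
--             tiles = len(comp)
--             crowns = sum(1 for (x, y) in comp if crown_results[x * 5 + y][2])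
--             visited.update(comp)
--             if crowns > 0:
--                 results.append((tiles, crowns, tiles * crowns))
--     return results
-- ===== Notes on version B (the rewrite author's own statement) =====
-- stated objective: alternative
-- what changed: Replaces A's explicit-stack DFS with per-pop incremented counters by a frontier-saturation (level-by-level wave) collection of each component into a set, with tile and crown counts computed from the finished component set; Pre_ excludes only the inputs where A (and B alike) raises IndexError.
import Mathlib
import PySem

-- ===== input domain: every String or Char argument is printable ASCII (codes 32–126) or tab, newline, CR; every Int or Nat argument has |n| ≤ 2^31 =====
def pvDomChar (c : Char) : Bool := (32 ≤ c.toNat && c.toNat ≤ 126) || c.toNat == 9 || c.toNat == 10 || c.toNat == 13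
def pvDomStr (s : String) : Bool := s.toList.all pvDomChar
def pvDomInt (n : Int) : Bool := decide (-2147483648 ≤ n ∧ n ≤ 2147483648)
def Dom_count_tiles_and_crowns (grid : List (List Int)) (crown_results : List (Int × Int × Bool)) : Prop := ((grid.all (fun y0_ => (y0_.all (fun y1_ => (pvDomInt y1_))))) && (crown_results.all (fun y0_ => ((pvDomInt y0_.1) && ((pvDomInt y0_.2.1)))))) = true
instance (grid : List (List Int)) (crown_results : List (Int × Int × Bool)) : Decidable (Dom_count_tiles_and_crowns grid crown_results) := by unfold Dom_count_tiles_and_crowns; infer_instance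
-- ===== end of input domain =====

-- B replaces A's explicit-stack DFS by frontier-saturation (level-by-level wave) component
-- collection, taking the counts from the finished component set; objective: alternative.


-- ===== PORT A =====
-- shared indexing helpers: grid[x][y] and crown_results[x*5+y][2]; in range under Pre_
def pvGridAt (grid : List (List Int)) (p : Int × Int) : Int :=
  PySem.List.pyGetD (PySem.List.pyGetD grid p.1 []) p.2 0

def pvCrownAt (cr : List (Int × Int × Bool)) (p : Int × Int) : Bool :=
  (PySem.List.pyGetD cr (p.1 * 5 + p.2) (0, 0, false)).2.2

-- the four neighbours [(cx-1,cy),(cx+1,cy),(cx,cy-1),(cx,cy+1)]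
def pvNbrs (p : Int × Int) : List (Int × Int) :=
  [(p.1 - 1, p.2), (p.1 + 1, p.2), (p.1, p.2 - 1), (p.1, p.2 + 1)]

-- A's while-loop over the stack (head of the list = top of the Python stack, so
-- stack.append pushes at the head and stack.pop() pops the head — same pop order).
-- fuel is only a totality guard; it is proved sufficient below.
def pvGfLoop (grid : List (List Int)) (cr : List (Int × Int × Bool)) (h w cat : Int) :
    Nat → List (Int × Int) → PySem.Set (Int × Int) → Int → Int →
    Int × Int × PySem.Set (Int × Int)
  | 0, _, vis, t, c => (t, c, vis)
  | _ + 1, [], vis, t, c => (t, c, vis)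
  | f + 1, s :: rest, vis, t, c =>
    if s ∈ vis then pvGfLoop grid cr h w cat f rest vis t c
    else
      let vis' := PySem.Set.add vis s
      let t' := t + 1
      let c' := if pvCrownAt cr s then c + 1 else c
      let stack' := (pvNbrs s).foldl (fun st n =>
        if 0 ≤ n.1 ∧ n.1 < h ∧ 0 ≤ n.2 ∧ n.2 < w ∧ pvGridAt grid n = cat ∧ ¬ n ∈ vis'
        then n :: st else st) rest
      pvGfLoop grid cr h w cat f stack' vis' t' c'

def count_tiles_and_crowns (grid : List (List Int)) (crown_results : List (Int × Int × Bool)) : List (Int × Int × Int) :=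
  let h : Int := PySem.List.len grid
  let w : Int := PySem.List.len (PySem.List.pyGetD grid 0 [])  -- len(grid[0]); only reached when grid ≠ []
  let fuel : Nat := grid.length * (grid.headD []).length * 5 + 2  -- totality guard, proved sufficient
  let step := fun (acc : PySem.Set (Int × Int) × List (Int × Int × Int)) (i : Int) =>
    (PySem.List.pyRange 0 w 1).foldl (fun acc j =>
      if (i, j) ∈ acc.1 then acc
      else
        let r := pvGfLoop grid crown_results h w (pvGridAt grid (i, j)) fuel [(i, j)] acc.1 0 0
        (r.2.2, if 0 < r.2.1 then acc.2 ++ [(r.1, r.2.1, r.1 * r.2.1)] else acc.2)) acc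
  ((PySem.List.pyRange 0 h 1).foldl step (PySem.Set.empty, [])).2

-- ===== PORT B =====
-- one saturation round: the deduplicated list of fresh neighbours of the frontier
def pvCollectNew (grid : List (List Int)) (h w cat : Int) (vis comp : PySem.Set (Int × Int))
    (frontier : List (Int × Int)) : List (Int × Int) :=
  frontier.foldl (fun new p =>
    (pvNbrs p).foldl (fun new n =>
      if (0 ≤ n.1 ∧ n.1 < h ∧ 0 ≤ n.2 ∧ n.2 < w ∧ pvGridAt grid n = cat ∧
          ¬ n ∈ vis ∧ ¬ n ∈ comp) ∧ ¬ n ∈ new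
      then new ++ [n] else new) new) []

-- B's 'for _ in range(h*w)' saturation loop with early break on an empty round
def pvSatLoop (grid : List (List Int)) (h w cat : Int) (vis : PySem.Set (Int × Int)) :
    Nat → PySem.Set (Int × Int) → List (Int × Int) → PySem.Set (Int × Int)
  | 0, comp, _ => comp
  | f + 1, comp, frontier =>
    let new := pvCollectNew grid h w cat vis comp frontier
    if new = [] then comp
    else pvSatLoop grid h w cat vis f (PySem.Set.update comp new) new

def count_tiles_and_crowns_alt (grid : List (List Int)) (crown_results : List (Int × Int × Bool)) : List (Int × Int × Int) :=
  let h : Int := PySem.List.len grid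
  let w : Int := match grid with | [] => 0 | g0 :: _ => PySem.List.len g0
  let step := fun (acc : PySem.Set (Int × Int) × List (Int × Int × Int)) (i : Int) =>
    (PySem.List.pyRange 0 w 1).foldl (fun acc j =>
      if (i, j) ∈ acc.1 then acc
      else
        let cat := pvGridAt grid (i, j)
        let comp := pvSatLoop grid h w cat acc.1 (h * w).toNat
          (PySem.Set.add PySem.Set.empty (i, j)) [(i, j)]
        let tiles : Int := PySem.Set.len comp
        let crowns : Int := comp.foldl (fun n p => if pvCrownAt crown_results p then n + 1 else n) 0
        (PySem.Set.update acc.1 comp,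
         if 0 < crowns then acc.2 ++ [(tiles, crowns, tiles * crowns)] else acc.2)) acc
  ((PySem.List.pyRange 0 h 1).foldl step (PySem.Set.empty, [])).2

-- ===== PRECONDITION & SPEC =====
-- Pre_ excludes exactly the inputs where Python A raises an IndexError: a row shorter than
-- len(grid[0]) (grid[nx][ny] on a ragged grid) or crown_results too short for the cell
-- index cx*5+cy of some visited cell.
def Pre_count_tiles_and_crowns (grid : List (List Int)) (crown_results : List (Int × Int × Bool)) : Prop :=
  (∀ row ∈ grid, (grid.headD []).length ≤ row.length) ∧
  (grid ≠ [] → (grid.headD []).length ≠ 0 →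
    (grid.length - 1) * 5 + ((grid.headD []).length - 1) < crown_results.length)
instance (grid : List (List Int)) (crown_results : List (Int × Int × Bool)) : Decidable (Pre_count_tiles_and_crowns grid crown_results) := by unfold Pre_count_tiles_and_crowns; infer_instance

def pvWitness_count_tiles_and_crowns : List (List Int) × (List (Int × Int × Bool)) :=
  ([[1, 2]], [(0, 0, true), (0, 1, false)])

def Spec_count_tiles_and_crowns (grid : List (List Int)) (crown_results : List (Int × Int × Bool)) (out : List (Int × Int × Int)) : Prop := out = count_tiles_and_crowns_alt grid crown_results
instance (grid : List (List Int)) (crown_results : List (Int × Int × Bool)) (out : List (Int × Int × Int)) : Decidable (Spec_count_tiles_and_crowns grid crown_results out) := by unfold Spec_count_tiles_and_crowns; infer_instance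

-- ===== CLAIM (what is proved, stated in full; the proofs are below) =====
def Claim_equal_count_tiles_and_crowns : Prop := ∀ (grid : List (List Int)) (crown_results : List (Int × Int × Bool)), Dom_count_tiles_and_crowns grid crown_results → Pre_count_tiles_and_crowns grid crown_results → Spec_count_tiles_and_crowns grid crown_results (count_tiles_and_crowns grid crown_results)

-- ===== LEMMAS AND PROOFS =====


-- cell (p) lies inside the h × w board
def pvInB (h w : Int) (p : Int × Int) : Prop := 0 ≤ p.1 ∧ p.1 < h ∧ 0 ≤ p.2 ∧ p.2 < w

-- same-category 4-adjacency (directed form; used by both loop analyses)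
def pvAdjP (grid : List (List Int)) (h w : Int) (a b : Int × Int) : Prop :=
  pvInB h w a ∧ pvInB h w b ∧ pvGridAt grid a = pvGridAt grid b ∧ b ∈ pvNbrs a

-- one adjacency step whose endpoints avoid the visited predicate V
def pvStepP (grid : List (List Int)) (h w : Int) (V : Int × Int → Prop) (a b : Int × Int) : Prop :=
  pvAdjP grid h w a b ∧ ¬ V a ∧ ¬ V b

-- cells reachable from an unvisited source in S along V-avoiding steps
def pvRA (grid : List (List Int)) (h w : Int) (S : List (Int × Int)) (V : Int × Int → Prop) :
    Set (Int × Int) :=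
  {u | ∃ a ∈ S, ¬ V a ∧ Relation.ReflTransGen (pvStepP grid h w V) a u}

lemma pvNbrs_ne {a b : Int × Int} (hb : b ∈ pvNbrs a) : b ≠ a := by
  simp only [pvNbrs, List.mem_cons, List.not_mem_nil, or_false] at hb
  rcases hb with h | h | h | h <;>
    (intro he; rw [he] at h
     have h1 := congrArg Prod.fst h; have h2 := congrArg Prod.snd h
     simp only at h1 h2; omega)

lemma pv_rtg_start_mem {grid h w} {V : Int × Int → Prop} {a u : Int × Int}
    (hV : V a) (hr : Relation.ReflTransGen (pvStepP grid h w V) a u) : u = a := by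
  rcases (Relation.ReflTransGen.cases_head hr) with h | ⟨c, hac, _⟩
  · exact h.symm
  · exact absurd hV hac.2.1

lemma pvRA_ext {grid h w} {S S' : List (Int × Int)} {V V' : Int × Int → Prop}
    (hS : ∀ x, x ∈ S ↔ x ∈ S') (hV : ∀ x, V x ↔ V' x) :
    pvRA grid h w S V = pvRA grid h w S' V' := by
  have hstep : pvStepP grid h w V = pvStepP grid h w V' := by
    funext a b; simp only [pvStepP, hV]
  simp only [pvRA, hstep]
  ext u; constructor <;> (rintro ⟨a, haS, haV, hr⟩; exact ⟨a, by simp_all [hS a, hV a], by simp_all [hV a], hr⟩)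

lemma pvRA_nil {grid h w} {V : Int × Int → Prop} : pvRA grid h w [] V = ∅ := by
  simp [pvRA]

lemma pvRA_not_V {grid h w} {S V} {u : Int × Int} (hu : u ∈ pvRA grid h w S V) : ¬ V u := by
  rcases hu with ⟨a, _, haV, hr⟩
  rcases (Relation.ReflTransGen.cases_tail hr) with h | ⟨c, _, hcu⟩
  · exact h ▸ haV
  · exact hcu.2.2

lemma pvRA_inB {grid h w} {S : List (Int × Int)} {V} (hS : ∀ a ∈ S, pvInB h w a)
    {u : Int × Int} (hu : u ∈ pvRA grid h w S V) : pvInB h w u := by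
  rcases hu with ⟨a, haS, _, hr⟩
  rcases (Relation.ReflTransGen.cases_tail hr) with h | ⟨c, _, hcu⟩
  · exact h ▸ hS a haS
  · exact hcu.1.2.1

lemma pvRA_cons_mem {grid h w} {s : Int × Int} {rest V} (hV : V s) :
    pvRA grid h w (s :: rest) V = pvRA grid h w rest V := by
  ext u; constructor
  · rintro ⟨a, ha, haV, hr⟩
    rcases List.mem_cons.mp ha with h | h
    · exact absurd (h ▸ hV) haV
    · exact ⟨a, h, haV, hr⟩
  · rintro ⟨a, ha, haV, hr⟩; exact ⟨a, List.mem_cons_of_mem _ ha, haV, hr⟩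

lemma pvInB_finite (h w : Int) : {p : Int × Int | pvInB h w p}.Finite := by
  apply Set.Finite.subset ((Set.finite_Icc (0 : Int) h).prod (Set.finite_Icc (0 : Int) w))
  rintro ⟨x, y⟩ ⟨h1, h2, h3, h4⟩
  exact ⟨⟨h1, le_of_lt h2⟩, ⟨h3, le_of_lt h4⟩⟩

lemma pvRA_finite {grid h w} {S : List (Int × Int)} {V} (hS : ∀ a ∈ S, pvInB h w a) :
    (pvRA grid h w S V).Finite :=
  Set.Finite.subset (pvInB_finite h w) (fun _ hu => pvRA_inB hS hu)

lemma pv_nodup_inB_length {h w : Int} {l : List (Int × Int)} (hnd : l.Nodup)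
    (hinB : ∀ a ∈ l, pvInB h w a) : l.length ≤ h.toNat * w.toNat := by
  have hsub : l.toFinset ⊆ (Finset.Icc (0 : Int) (h - 1)) ×ˢ (Finset.Icc (0 : Int) (w - 1)) := by
    intro a ha
    rcases hinB a (List.mem_toFinset.mp ha) with ⟨h1, h2, h3, h4⟩
    simp only [Finset.mem_product, Finset.mem_Icc]
    omega
  have hcard := Finset.card_le_card hsub
  rw [List.toFinset_card_of_nodup hnd] at hcard
  simpa [Int.card_Icc] using hcard

lemma pv_length_eq_ncard {l : List (Int × Int)} {S : Set (Int × Int)} (hnd : l.Nodup)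
    (hmem : ∀ x, x ∈ l ↔ x ∈ S) : S.ncard = l.length := by
  have : S = ↑l.toFinset := by ext x; simp [← hmem x]
  rw [this, Set.ncard_coe_finset, List.toFinset_card_of_nodup hnd]


-- avoiding one more node: a V-avoiding walk either already avoids s, re-enters through a
-- neighbour of s, or ends at s
lemma pvReroute {grid h w} {V : Int × Int → Prop} {s a u : Int × Int}
    (hr : Relation.ReflTransGen (pvStepP grid h w V) a u) :
    Relation.ReflTransGen (pvStepP grid h w (fun x => V x ∨ x = s)) a u
    ∨ (∃ n, pvAdjP grid h w s n ∧ ¬ V n ∧ n ≠ s ∧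
        Relation.ReflTransGen (pvStepP grid h w (fun x => V x ∨ x = s)) n u)
    ∨ u = s := by
  induction hr using Relation.ReflTransGen.head_induction_on with
  | refl => exact Or.inl Relation.ReflTransGen.refl
  | head hstep _ ih =>
    rename_i x c _
    rcases ih with hc | hmid | hus
    · by_cases hcs : c = s
      · subst hcs
        have := pv_rtg_start_mem (V := fun x => V x ∨ x = c) (Or.inr rfl) hc
        exact Or.inr (Or.inr this)
      · by_cases hxs : x = s
        · subst hxs
          exact Or.inr (Or.inl ⟨c, hstep.1, hstep.2.2, hcs, hc⟩)
        · refine Or.inl (Relation.ReflTransGen.head ⟨hstep.1, ?_, ?_⟩ hc)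
          · push Not; exact ⟨hstep.2.1, hxs⟩
          · push Not; exact ⟨hstep.2.2, hcs⟩
    · exact Or.inr (Or.inl hmid)
    · exact Or.inr (Or.inr hus)

-- a step with a weaker avoided set is still a step
lemma pv_rtg_weaken {grid h w} {V V' : Int × Int → Prop} (hVV : ∀ x, V x → V' x)
    {a u : Int × Int} (hr : Relation.ReflTransGen (pvStepP grid h w V') a u) :
    Relation.ReflTransGen (pvStepP grid h w V) a u := by
  refine Relation.ReflTransGen.mono ?_ hr
  rintro x y ⟨hadj, hx, hy⟩
  exact ⟨hadj, fun hc => hx (hVV _ hc), fun hc => hy (hVV _ hc)⟩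

-- popping a fresh cell s: reachability decomposes into s itself plus reachability from the
-- remaining stack together with s's fresh neighbours, now also avoiding s
lemma pvRA_cons_new {grid h w} {s : Int × Int} {rest S' : List (Int × Int)}
    {V : Int × Int → Prop} (hs : ¬ V s)
    (hS' : ∀ x, x ∈ S' ↔ x ∈ rest ∨ (pvAdjP grid h w s x ∧ ¬ V x)) :
    pvRA grid h w (s :: rest) V =
      insert s (pvRA grid h w S' (fun x => V x ∨ x = s)) := by
  ext u; constructor
  · rintro ⟨a, ha, haV, hr⟩
    rcases pvReroute (s := s) hr with hc | ⟨n, hn1, hn2, hn3, hn4⟩ | hus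
    · by_cases has : a = s
      · subst has
        have := pv_rtg_start_mem (V := fun x => V x ∨ x = a) (Or.inr rfl) hc
        exact Set.mem_insert_iff.mpr (Or.inl this)
      · rcases List.mem_cons.mp ha with h | h
        · exact absurd h has
        · exact Set.mem_insert_iff.mpr (Or.inr ⟨a, (hS' a).mpr (Or.inl h), by push Not; exact ⟨haV, has⟩, hc⟩)
    · exact Set.mem_insert_iff.mpr (Or.inr ⟨n, (hS' n).mpr (Or.inr ⟨hn1, hn2⟩), by push Not; exact ⟨hn2, hn3⟩, hn4⟩)
    · exact Set.mem_insert_iff.mpr (Or.inl hus)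
  · intro hu
    rcases Set.mem_insert_iff.mp hu with h | ⟨a, haS, haV, hr⟩
    · exact ⟨s, List.mem_cons_self, hs, h ▸ Relation.ReflTransGen.refl⟩
    · push Not at haV
      have hr' : Relation.ReflTransGen (pvStepP grid h w V) a u :=
        pv_rtg_weaken (fun x hx => Or.inl hx) hr
      rcases (hS' a).mp haS with h | ⟨hadj, hVa⟩
      · exact ⟨a, List.mem_cons_of_mem _ h, haV.1, hr'⟩
      · refine ⟨s, List.mem_cons_self, hs, Relation.ReflTransGen.head ⟨hadj, hs, haV.1⟩ hr'⟩


-- membership and length of A's neighbour-pushing fold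
lemma pv_mem_foldl_cons_if {α : Type} (P : α → Prop) [DecidablePred P] :
    ∀ (l init : List α) (x : α),
      (x ∈ l.foldl (fun st n => if P n then n :: st else st) init) ↔
        x ∈ init ∨ (x ∈ l ∧ P x) := by
  intro l
  induction l with
  | nil => simp
  | cons n l ih =>
    intro init x
    simp only [List.foldl_cons, ih, List.mem_cons]
    by_cases hn : P n <;> simp [hn] <;> by_cases hx : x = n <;> simp [hx] <;> tauto

lemma pv_length_foldl_cons_if {α : Type} (P : α → Prop) [DecidablePred P] :
    ∀ (l init : List α),
      (l.foldl (fun st n => if P n then n :: st else st) init).length ≤ init.length + l.length := by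
  intro l
  induction l with
  | nil => simp
  | cons n l ih =>
    intro init
    simp only [List.foldl_cons]
    by_cases hn : P n
    · rw [if_pos hn]
      have h2 := ih (n :: init)
      simp only [List.length_cons] at h2 ⊢
      omega
    · rw [if_neg hn]
      have h2 := ih init
      simp only [List.length_cons]
      omega

-- membership and nodup of B's deduplicating append fold (one frontier cell)
lemma pv_mem_foldl_append_dedup (P : Int × Int → Prop) [DecidablePred P] :
    ∀ (l init : List (Int × Int)) (x : Int × Int),
      (x ∈ l.foldl (fun new n => if P n ∧ ¬ n ∈ new then new ++ [n] else new) init) ↔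
        x ∈ init ∨ (x ∈ l ∧ P x) := by
  intro l
  induction l with
  | nil => simp
  | cons n l ih =>
    intro init x
    simp only [List.foldl_cons, ih, List.mem_cons]
    by_cases hP : P n
    · by_cases hn : n ∈ init <;> simp [hP, hn] <;> by_cases hx : x = n <;> simp [hx] <;> tauto
    · simp only [hP, false_and, if_false]
      constructor
      · tauto
      · rintro (h | ⟨h1, h2⟩)
        · exact Or.inl h
        · rcases h1 with rfl | h1
          · exact absurd h2 hP
          · exact Or.inr ⟨h1, h2⟩

lemma pv_nodup_foldl_append_dedup (P : Int × Int → Prop) [DecidablePred P] :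
    ∀ (l init : List (Int × Int)), init.Nodup →
      (l.foldl (fun new n => if P n ∧ ¬ n ∈ new then new ++ [n] else new) init).Nodup := by
  intro l
  induction l with
  | nil => intro init h; simpa
  | cons n l ih =>
    intro init h
    simp only [List.foldl_cons]
    split_ifs with hc
    · refine ih _ ?_
      rw [List.nodup_append]
      exact ⟨h, List.nodup_singleton n, by
        intro a ha b hb
        simp only [List.mem_singleton] at hb
        exact fun he => hc.2 ((hb ▸ he) ▸ ha)⟩
    · exact ih _ h

-- membership / nodup of B's whole collection round
lemma pv_mem_collect_aux {P : Int × Int → Prop} [DecidablePred P] :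
    ∀ (frontier init : List (Int × Int)) (x : Int × Int),
      (x ∈ frontier.foldl (fun new p => (pvNbrs p).foldl
          (fun new n => if P n ∧ ¬ n ∈ new then new ++ [n] else new) new) init) ↔
        x ∈ init ∨ ((∃ p ∈ frontier, x ∈ pvNbrs p) ∧ P x) := by
  intro frontier
  induction frontier with
  | nil => simp
  | cons p fr ih =>
    intro init x
    have hin := pv_mem_foldl_append_dedup P (pvNbrs p) init x
    rw [List.foldl_cons, ih]
    simp only at hin ⊢
    rw [hin]
    constructor
    · rintro (⟨h | h⟩ | h)
      · exact Or.inl h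
      · exact Or.inr ⟨⟨p, List.mem_cons_self, h.1⟩, h.2⟩
      · exact Or.inr ⟨⟨h.1.choose, List.mem_cons_of_mem _ h.1.choose_spec.1, h.1.choose_spec.2⟩, h.2⟩
    · rintro (h | ⟨⟨q, hq, hxq⟩, hP⟩)
      · exact Or.inl (Or.inl h)
      · rcases List.mem_cons.mp hq with rfl | hq
        · exact Or.inl (Or.inr ⟨hxq, hP⟩)
        · exact Or.inr ⟨⟨q, hq, hxq⟩, hP⟩

lemma pv_nodup_collect_aux {P : Int × Int → Prop} [DecidablePred P] :
    ∀ (frontier init : List (Int × Int)), init.Nodup →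
      (frontier.foldl (fun new p => (pvNbrs p).foldl
          (fun new n => if P n ∧ ¬ n ∈ new then new ++ [n] else new) new) init).Nodup := by
  intro frontier
  induction frontier with
  | nil => intro init h; simpa
  | cons p fr ih =>
    intro init h
    rw [List.foldl_cons]
    exact ih _ (pv_nodup_foldl_append_dedup P (pvNbrs p) init h)

-- filtering an inserted fresh element
lemma pv_sep_insert_pos {R : Set (Int × Int)} {s : Int × Int} (hfin : R.Finite) (hs : s ∉ R)
    (P : Int × Int → Prop) (hP : P s) :
    {u ∈ insert s R | P u}.ncard = {u ∈ R | P u}.ncard + 1 := by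
  have hset : {u ∈ insert s R | P u} = insert s {u ∈ R | P u} := by
    ext u; simp only [Set.mem_insert_iff, Set.mem_setOf_eq]
    constructor
    · rintro ⟨h | h, hp⟩
      · exact Or.inl h
      · exact Or.inr ⟨h, hp⟩
    · rintro (h | ⟨h, hp⟩)
      · exact ⟨Or.inl h, h ▸ hP⟩
      · exact ⟨Or.inr h, hp⟩
  rw [hset, Set.ncard_insert_of_notMem (fun hc => hs hc.1) (hfin.subset (Set.sep_subset _ _))]

lemma pv_sep_insert_neg {R : Set (Int × Int)} {s : Int × Int}
    (P : Int × Int → Prop) (hP : ¬ P s) :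
    {u ∈ insert s R | P u} = {u ∈ R | P u} := by
  ext u; simp only [Set.mem_insert_iff, Set.mem_sep_iff]
  constructor
  · rintro ⟨h | h, hp⟩
    · exact absurd (h ▸ hp) hP
    · exact ⟨h, hp⟩
  · rintro ⟨h, hp⟩; exact ⟨Or.inr h, hp⟩

-- unfolding A's loop on a fresh popped cell
lemma pvGfLoop_cons_not_mem {grid cr h w cat f} {s : Int × Int} {rest vis t c}
    (hsv : ¬ s ∈ vis) :
    pvGfLoop grid cr h w cat (f + 1) (s :: rest) vis t c =
      pvGfLoop grid cr h w cat f
        ((pvNbrs s).foldl (fun st n =>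
          if 0 ≤ n.1 ∧ n.1 < h ∧ 0 ≤ n.2 ∧ n.2 < w ∧ pvGridAt grid n = cat ∧
             ¬ n ∈ PySem.Set.add vis s
          then n :: st else st) rest)
        (PySem.Set.add vis s) (t + 1) (if pvCrownAt cr s then c + 1 else c) := by
  simp [pvGfLoop, hsv]

-- A's stack loop computes the V-avoiding reachable set of its stack: the tile count, the
-- crown count and the final visited set are those of pvRA
lemma pvGfLoop_spec (grid : List (List Int)) (cr : List (Int × Int × Bool)) (h w cat : Int) :
    ∀ (fuel : Nat) (S : List (Int × Int)) (vis : PySem.Set (Int × Int)) (t c : Int),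
      (∀ a ∈ S, pvInB h w a ∧ pvGridAt grid a = cat) →
      vis.Nodup → (∀ a ∈ vis, pvInB h w a) →
      S.length + 5 * (h.toNat * w.toNat - vis.length) < fuel →
      ∃ W : PySem.Set (Int × Int),
        pvGfLoop grid cr h w cat fuel S vis t c =
          (t + ((pvRA grid h w S (· ∈ vis)).ncard : Int),
           c + (({u ∈ pvRA grid h w S (· ∈ vis) | pvCrownAt cr u = true}).ncard : Int),
           W) ∧
        W.Nodup ∧ (∀ x, x ∈ W ↔ x ∈ vis ∨ x ∈ pvRA grid h w S (· ∈ vis)) ∧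
        (∀ x ∈ W, pvInB h w x) := by
  intro fuel
  induction fuel with
  | zero => intro S vis t c _ _ _ hfuel; exact absurd hfuel (Nat.not_lt_zero _)
  | succ f ih =>
    intro S vis t c hS hnd hinB hfuel
    cases S with
    | nil =>
      refine ⟨vis, ?_, hnd, ?_, hinB⟩
      · simp [pvGfLoop, pvRA_nil]
      · intro x; simp [pvRA_nil]
    | cons s rest =>
      by_cases hsv : s ∈ vis
      · have hstep : pvGfLoop grid cr h w cat (f + 1) (s :: rest) vis t c =
            pvGfLoop grid cr h w cat f rest vis t c := by simp [pvGfLoop, hsv]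
        have hRA := pvRA_cons_mem (grid := grid) (h := h) (w := w) (rest := rest)
          (V := (· ∈ vis)) hsv
        rcases ih rest vis t c (fun a ha => hS a (List.mem_cons_of_mem _ ha)) hnd hinB
          (by simp only [List.length_cons] at hfuel; omega) with ⟨W, heq, hndW, hmemW, hinBW⟩
        refine ⟨W, ?_, hndW, ?_, hinBW⟩
        · rw [hstep, heq, hRA]
        · intro x; rw [hmemW x, hRA]
      · -- fresh cell s
        have hsin := hS s List.mem_cons_self
        have hvis' : PySem.Set.add vis s = vis ++ [s] := PySem.Set.add_of_not_mem hsv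
        have hmemvis' : ∀ x, x ∈ PySem.Set.add vis s ↔ x ∈ vis ∨ x = s := by
          intro x; simp [PySem.Set.mem_add]
        set stack' := (pvNbrs s).foldl (fun st n =>
          if 0 ≤ n.1 ∧ n.1 < h ∧ 0 ≤ n.2 ∧ n.2 < w ∧ pvGridAt grid n = cat ∧
             ¬ n ∈ PySem.Set.add vis s
          then n :: st else st) rest with hstack'
        have hmemstack : ∀ x, x ∈ stack' ↔
            x ∈ rest ∨ (pvAdjP grid h w s x ∧ ¬ x ∈ vis) := by
          intro x
          rw [hstack', pv_mem_foldl_cons_if]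
          constructor
          · rintro (hx | ⟨hxn, h1, h2, h3, h4, h5, h6⟩)
            · exact Or.inl hx
            · refine Or.inr ⟨⟨hsin.1, ⟨h1, h2, h3, h4⟩, by rw [hsin.2, h5], hxn⟩, ?_⟩
              intro hc; exact h6 ((hmemvis' x).mpr (Or.inl hc))
          · rintro (hx | ⟨⟨hinBs, hinBx, hcat, hxn⟩, hxv⟩)
            · exact Or.inl hx
            · refine Or.inr ⟨hxn, hinBx.1, hinBx.2.1, hinBx.2.2.1, hinBx.2.2.2, ?_, ?_⟩
              · rw [← hcat, hsin.2]
              · intro hc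
                rcases (hmemvis' x).mp hc with hc | hc
                · exact hxv hc
                · exact pvNbrs_ne hxn hc
        have hS' : ∀ a ∈ stack', pvInB h w a ∧ pvGridAt grid a = cat := by
          intro a ha
          rcases (hmemstack a).mp ha with hx | ⟨hadj, _⟩
          · exact hS a (List.mem_cons_of_mem _ hx)
          · exact ⟨hadj.2.1, by rw [← hadj.2.2.1, hsin.2]⟩
        have hnd' : (PySem.Set.add vis s).Nodup := PySem.Set.nodup_add vis s hnd
        have hinB' : ∀ a ∈ PySem.Set.add vis s, pvInB h w a := by
          intro a ha
          rcases (hmemvis' a).mp ha with ha | ha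
          · exact hinB a ha
          · exact ha ▸ hsin.1
        have hlenvis' : (PySem.Set.add vis s).length = vis.length + 1 := by
          rw [hvis']; simp
        have hbound : vis.length + 1 ≤ h.toNat * w.toNat := by
          have := pv_nodup_inB_length hnd' hinB'
          rwa [hlenvis'] at this
        have hlenstack : stack'.length ≤ rest.length + 4 := by
          rw [hstack']
          have := pv_length_foldl_cons_if (fun n : Int × Int =>
            0 ≤ n.1 ∧ n.1 < h ∧ 0 ≤ n.2 ∧ n.2 < w ∧ pvGridAt grid n = cat ∧
              ¬ n ∈ PySem.Set.add vis s) (pvNbrs s) rest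
          simpa [pvNbrs] using this
        have hfuel' : stack'.length + 5 * (h.toNat * w.toNat - (PySem.Set.add vis s).length) < f := by
          rw [hlenvis']
          simp only [List.length_cons] at hfuel
          omega
        rcases ih stack' (PySem.Set.add vis s) (t + 1) (if pvCrownAt cr s then c + 1 else c)
          hS' hnd' hinB' hfuel' with ⟨W, heq, hndW, hmemW, hinBW⟩
        -- the reachability decomposition
        have hRAext : pvRA grid h w stack' (· ∈ PySem.Set.add vis s) =
            pvRA grid h w stack' (fun x => x ∈ vis ∨ x = s) :=
          pvRA_ext (fun x => Iff.rfl) hmemvis'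
        have hRA : pvRA grid h w (s :: rest) (· ∈ vis) =
            insert s (pvRA grid h w stack' (fun x => x ∈ vis ∨ x = s)) :=
          pvRA_cons_new hsv hmemstack
        have hfin : (pvRA grid h w stack' (fun x => x ∈ vis ∨ x = s)).Finite :=
          pvRA_finite (fun a ha => (hS' a ha).1)
        have hsnot : s ∉ pvRA grid h w stack' (fun x => x ∈ vis ∨ x = s) := by
          intro hc; exact pvRA_not_V hc (Or.inr rfl)
        have hncard : (pvRA grid h w (s :: rest) (· ∈ vis)).ncard =
            (pvRA grid h w stack' (fun x => x ∈ vis ∨ x = s)).ncard + 1 := by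
          rw [hRA, Set.ncard_insert_of_notMem hsnot hfin]
        refine ⟨W, ?_, hndW, ?_, hinBW⟩
        · rw [pvGfLoop_cons_not_mem hsv, ← hstack', heq, hRAext, hncard]
          by_cases hcr : pvCrownAt cr s = true
          · have hB : {u | u ∈ pvRA grid h w (s :: rest) (· ∈ vis) ∧ pvCrownAt cr u = true}.ncard =
                {u | u ∈ pvRA grid h w stack' (fun x => x ∈ vis ∨ x = s) ∧ pvCrownAt cr u = true}.ncard + 1 := by
              rw [hRA]
              exact pv_sep_insert_pos hfin hsnot _ hcr
            rw [hB, if_pos hcr]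
            simp only [Prod.mk.injEq]
            refine ⟨by push_cast; ring, by push_cast; ring, trivial⟩
          · have hB : {u | u ∈ pvRA grid h w (s :: rest) (· ∈ vis) ∧ pvCrownAt cr u = true} =
                {u | u ∈ pvRA grid h w stack' (fun x => x ∈ vis ∨ x = s) ∧ pvCrownAt cr u = true} := by
              rw [hRA]
              exact pv_sep_insert_neg _ hcr
            rw [hB, if_neg hcr]
            simp only [Prod.mk.injEq]
            refine ⟨by push_cast; ring, trivial⟩
        · intro x
          rw [hmemW x, hRAext, hRA, hmemvis' x, Set.mem_insert_iff]
          tauto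


-- B's saturation loop computes the same V-avoiding reachable set (from its start cell)
lemma pvSatLoop_spec (grid : List (List Int)) (h w cat : Int) (vis : PySem.Set (Int × Int))
    (s0 : Int × Int) (hs0V : ¬ s0 ∈ vis) :
    ∀ (fuel : Nat) (comp : PySem.Set (Int × Int)) (frontier : List (Int × Int)),
      comp.Nodup →
      (∀ x ∈ comp, pvInB h w x ∧ pvGridAt grid x = cat ∧ ¬ x ∈ vis) →
      s0 ∈ comp →
      (∀ x ∈ frontier, x ∈ comp) →
      (∀ x ∈ comp, x ∉ frontier → ∀ n, pvAdjP grid h w x n → ¬ n ∈ vis → n ∈ comp) →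
      (∀ x ∈ comp, Relation.ReflTransGen (pvStepP grid h w (· ∈ vis)) s0 x) →
      h.toNat * w.toNat < comp.length + fuel →
      (pvSatLoop grid h w cat vis fuel comp frontier).Nodup ∧
      (∀ x, x ∈ pvSatLoop grid h w cat vis fuel comp frontier ↔
        x ∈ pvRA grid h w [s0] (· ∈ vis)) := by
  intro fuel
  induction fuel with
  | zero =>
    intro comp frontier hnd hcells _ _ _ _ hfuel
    have := pv_nodup_inB_length hnd (fun a ha => (hcells a ha).1)
    omega
  | succ f ih =>
    intro comp frontier hnd hcells hs0 hfr hclosed hreach hfuel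
    have hmemnew : ∀ x, x ∈ pvCollectNew grid h w cat vis comp frontier ↔
        (∃ p ∈ frontier, x ∈ pvNbrs p) ∧
          (0 ≤ x.1 ∧ x.1 < h ∧ 0 ≤ x.2 ∧ x.2 < w ∧ pvGridAt grid x = cat ∧
           ¬ x ∈ vis ∧ ¬ x ∈ comp) := by
      intro x
      simp only [pvCollectNew]
      rw [pv_mem_collect_aux]
      simp
    by_cases hnew : pvCollectNew grid h w cat vis comp frontier = []
    · have hloop : pvSatLoop grid h w cat vis (f + 1) comp frontier = comp := by
        simp only [pvSatLoop]
        rw [if_pos hnew]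
      have hclosed' : ∀ x ∈ comp, ∀ n, pvAdjP grid h w x n → ¬ n ∈ vis → n ∈ comp := by
        intro x hx n hadj hnv
        by_cases hxf : x ∈ frontier
        · by_cases hnc : n ∈ comp
          · exact hnc
          · exfalso
            have : n ∈ pvCollectNew grid h w cat vis comp frontier := by
              rw [hmemnew n]
              refine ⟨⟨x, hxf, hadj.2.2.2⟩, hadj.2.1.1, hadj.2.1.2.1, hadj.2.1.2.2.1,
                hadj.2.1.2.2.2, ?_, hnv, hnc⟩
              rw [← hadj.2.2.1, (hcells x hx).2.1]
            rw [hnew] at this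
            exact absurd this (List.not_mem_nil)
        · exact hclosed x hx hxf n hadj hnv
      rw [hloop]
      refine ⟨hnd, fun x => ⟨?_, ?_⟩⟩
      · intro hx
        exact ⟨s0, List.mem_singleton.mpr rfl, hs0V, hreach x hx⟩
      · rintro ⟨a, ha, _, hr⟩
        rw [List.mem_singleton] at ha
        subst ha
        induction hr with
        | refl => exact hs0
        | tail _ hstep ihr => exact hclosed' _ ihr _ hstep.1 hstep.2.2
    · have hloop : pvSatLoop grid h w cat vis (f + 1) comp frontier =
          pvSatLoop grid h w cat vis f
            (PySem.Set.update comp (pvCollectNew grid h w cat vis comp frontier))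
            (pvCollectNew grid h w cat vis comp frontier) := by
        simp only [pvSatLoop]
        rw [if_neg hnew]
      set new := pvCollectNew grid h w cat vis comp frontier with hdefnew
      have hndnew : new.Nodup := by
        rw [hdefnew]
        simp only [pvCollectNew]
        exact pv_nodup_collect_aux _ _ List.nodup_nil
      have hdisj : ∀ x ∈ new, ¬ x ∈ comp := fun x hx => ((hmemnew x).mp hx).2.2.2.2.2.2.2
      have happ : PySem.Set.update comp new = comp ++ new :=
        PySem.Set.update_eq_append_of_disjoint comp new hndnew hdisj
      have hmemup : ∀ x, x ∈ PySem.Set.update comp new ↔ x ∈ comp ∨ x ∈ new := by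
        intro x; rw [happ]; simp
      have hndup : (PySem.Set.update comp new).Nodup := by
        rw [happ, List.nodup_append]
        exact ⟨hnd, hndnew, by
          intro a ha b hb he
          exact hdisj b hb (he ▸ ha)⟩
      have hlenup : (PySem.Set.update comp new).length = comp.length + new.length := by
        rw [happ, List.length_append]
      have hcells' : ∀ x ∈ PySem.Set.update comp new,
          pvInB h w x ∧ pvGridAt grid x = cat ∧ ¬ x ∈ vis := by
        intro x hx
        rcases (hmemup x).mp hx with hx | hx
        · exact hcells x hx
        · rcases (hmemnew x).mp hx with ⟨_, h1, h2, h3, h4, h5, h6, _⟩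
          exact ⟨⟨h1, h2, h3, h4⟩, h5, h6⟩
      have hreach' : ∀ x ∈ PySem.Set.update comp new,
          Relation.ReflTransGen (pvStepP grid h w (· ∈ vis)) s0 x := by
        intro x hx
        rcases (hmemup x).mp hx with hx | hx
        · exact hreach x hx
        · rcases (hmemnew x).mp hx with ⟨⟨p, hp, hxp⟩, h1, h2, h3, h4, h5, h6, _⟩
          have hpc := hfr p hp
          refine Relation.ReflTransGen.tail (hreach p hpc) ?_
          exact ⟨⟨(hcells p hpc).1, ⟨h1, h2, h3, h4⟩,
            by rw [(hcells p hpc).2.1, h5], hxp⟩, (hcells p hpc).2.2, h6⟩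
      have hclosed'' : ∀ x ∈ PySem.Set.update comp new, x ∉ new →
          ∀ n, pvAdjP grid h w x n → ¬ n ∈ vis → n ∈ PySem.Set.update comp new := by
        intro x hx hxn n hadj hnv
        have hxc : x ∈ comp := by
          rcases (hmemup x).mp hx with hx | hx
          · exact hx
          · exact absurd hx hxn
        by_cases hxf : x ∈ frontier
        · by_cases hnc : n ∈ comp
          · exact (hmemup n).mpr (Or.inl hnc)
          · refine (hmemup n).mpr (Or.inr ?_)
            rw [hmemnew n]
            refine ⟨⟨x, hxf, hadj.2.2.2⟩, hadj.2.1.1, hadj.2.1.2.1, hadj.2.1.2.2.1,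
              hadj.2.1.2.2.2, ?_, hnv, hnc⟩
            rw [← hadj.2.2.1, (hcells x hxc).2.1]
        · exact (hmemup n).mpr (Or.inl (hclosed x hxc hxf n hadj hnv))
      have hfuel' : h.toNat * w.toNat < (PySem.Set.update comp new).length + f := by
        have : 1 ≤ new.length := List.length_pos_iff.mpr hnew
        rw [hlenup]; omega
      rw [hloop]
      exact ih (PySem.Set.update comp new) new hndup hcells' ((hmemup s0).mpr (Or.inl hs0))
        (fun x hx => (hmemup x).mpr (Or.inr hx)) hclosed'' hreach' hfuel'


-- counting by a Bool predicate over a nodup enumeration of a set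
lemma pv_countP_eq_ncard {C : List (Int × Int)} {R : Set (Int × Int)} (p : Int × Int → Bool)
    (hnd : C.Nodup) (hmem : ∀ x, x ∈ C ↔ x ∈ R) :
    {u ∈ R | p u = true}.ncard = C.countP p := by
  rw [List.countP_eq_length_filter]
  apply pv_length_eq_ncard (hnd.filter p)
  intro x
  simp only [List.mem_filter, Set.mem_sep_iff, ← hmem x]

-- transporting a relation along two folds over the same index list
lemma pv_foldl_rel {σ τ : Type} (R : σ → τ → Prop) (f : σ → Int → σ) (g : τ → Int → τ) :
    ∀ (l : List Int), (∀ s t x, x ∈ l → R s t → R (f s x) (g t x)) →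
      ∀ s t, R s t → R (l.foldl f s) (l.foldl g t) := by
  intro l
  induction l with
  | nil => intro _ s t h; simpa
  | cons x l ih =>
    intro hstep s t h
    simp only [List.foldl_cons]
    exact ih (fun s t y hy => hstep s t y (List.mem_cons_of_mem _ hy))
      _ _ (hstep s t x List.mem_cons_self h)

-- the state relation carried across the row-major scan: equal outputs, visited sets with
-- the same members (possibly different insertion order), both nodup and in bounds
def pvRel (h w : Int) (a b : PySem.Set (Int × Int) × List (Int × Int × Int)) : Prop :=
  a.2 = b.2 ∧ a.1.Nodup ∧ b.1.Nodup ∧ (∀ x, x ∈ a.1 ↔ x ∈ b.1) ∧ (∀ x ∈ a.1, pvInB h w x)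

lemma pv_getD_zero {α : Type} (xs : List α) (d : α) : xs.getD 0 d = xs.headD d := by
  cases xs <;> simp

lemma pv_w_eq (grid : List (List Int)) :
    (match grid with | [] => (0 : Int) | g0 :: _ => PySem.List.len g0) =
      PySem.List.len (PySem.List.pyGetD grid 0 []) := by
  cases grid <;> simp [PySem.List.len_eq, PySem.List.pyGetD_zero, pv_getD_zero]


-- named copies (definitionally equal) of the two ports' row steps, for the transport proof
def pvAStep (grid : List (List Int)) (cr : List (Int × Int × Bool)) (h w : Int) (fuel : Nat) :
    (PySem.Set (Int × Int) × List (Int × Int × Int)) → Int →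
    (PySem.Set (Int × Int) × List (Int × Int × Int)) := fun acc i =>
  (PySem.List.pyRange 0 w 1).foldl (fun acc j =>
    if (i, j) ∈ acc.1 then acc
    else
      let r := pvGfLoop grid cr h w (pvGridAt grid (i, j)) fuel [(i, j)] acc.1 0 0
      (r.2.2, if 0 < r.2.1 then acc.2 ++ [(r.1, r.2.1, r.1 * r.2.1)] else acc.2)) acc

def pvBStep (grid : List (List Int)) (cr : List (Int × Int × Bool)) (h w : Int) :
    (PySem.Set (Int × Int) × List (Int × Int × Int)) → Int →
    (PySem.Set (Int × Int) × List (Int × Int × Int)) := fun acc i =>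
  (PySem.List.pyRange 0 w 1).foldl (fun acc j =>
    if (i, j) ∈ acc.1 then acc
    else
      let cat := pvGridAt grid (i, j)
      let comp := pvSatLoop grid h w cat acc.1 (h * w).toNat
        (PySem.Set.add PySem.Set.empty (i, j)) [(i, j)]
      let tiles : Int := PySem.Set.len comp
      let crowns : Int := comp.foldl (fun n p => if pvCrownAt cr p then n + 1 else n) 0
      (PySem.Set.update acc.1 comp,
       if 0 < crowns then acc.2 ++ [(tiles, crowns, tiles * crowns)] else acc.2)) acc

lemma pv_A_eq (grid : List (List Int)) (cr : List (Int × Int × Bool)) :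
    count_tiles_and_crowns grid cr =
      ((PySem.List.pyRange 0 (PySem.List.len grid) 1).foldl
        (pvAStep grid cr (PySem.List.len grid) (PySem.List.len (PySem.List.pyGetD grid 0 []))
          (grid.length * (grid.headD []).length * 5 + 2))
        (PySem.Set.empty, [])).2 := rfl

lemma pv_B_eq (grid : List (List Int)) (cr : List (Int × Int × Bool)) :
    count_tiles_and_crowns_alt grid cr =
      ((PySem.List.pyRange 0 (PySem.List.len grid) 1).foldl
        (pvBStep grid cr (PySem.List.len grid)
          (match grid with | [] => (0 : Int) | g0 :: _ => PySem.List.len g0))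
        (PySem.Set.empty, [])).2 := rfl

-- one row-major cell: the two ports keep the states related
lemma pv_step_rel (grid : List (List Int)) (cr : List (Int × Int × Bool)) (h w : Int)
    (fuel : Nat) (hfuel : h.toNat * w.toNat * 5 + 2 ≤ fuel)
    (i : Int) (hi : 0 ≤ i ∧ i < h)
    (a b : PySem.Set (Int × Int) × List (Int × Int × Int)) (hrel : pvRel h w a b) :
    pvRel h w (pvAStep grid cr h w fuel a i) (pvBStep grid cr h w b i) := by
  unfold pvAStep pvBStep
  refine pv_foldl_rel _ _ _ _ ?_ a b hrel
  intro s t j hjmem hst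
  rw [PySem.List.mem_pyRange_one] at hjmem
  obtain ⟨hout, hndS, hndT, hmemST, hinBS⟩ := hst
  by_cases hskip : (i, j) ∈ s.1
  · rw [if_pos hskip, if_pos ((hmemST _).mp hskip)]
    exact ⟨hout, hndS, hndT, hmemST, hinBS⟩
  · have hskipT : ¬ (i, j) ∈ t.1 := fun hc => hskip ((hmemST _).mpr hc)
    rw [if_neg hskip, if_neg hskipT]
    have hij : pvInB h w (i, j) := ⟨hi.1, hi.2, hjmem.1, hjmem.2⟩
    -- A side: the DFS loop
    obtain ⟨WA, heqA, hndA, hmemA, hinBA⟩ :=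
      pvGfLoop_spec grid cr h w (pvGridAt grid (i, j)) fuel [(i, j)] s.1 0 0
        (by
          intro a ha
          rw [List.mem_singleton] at ha
          subst ha
          exact ⟨hij, rfl⟩)
        hndS hinBS
        (by
          have hlen : s.1.length ≤ h.toNat * w.toNat := pv_nodup_inB_length hndS hinBS
          simp only [List.length_singleton]
          omega)
    -- B side: the saturation loop
    have hcomp0 : PySem.Set.add (PySem.Set.empty : PySem.Set (Int × Int)) (i, j) = [(i, j)] := by
      rfl
    obtain ⟨hndC, hmemC⟩ :=
      pvSatLoop_spec grid h w (pvGridAt grid (i, j)) t.1 (i, j) hskipT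
        ((h * w).toNat) [(i, j)] [(i, j)]
        (List.nodup_singleton _)
        (by
          intro x hx
          rw [List.mem_singleton] at hx
          subst hx
          exact ⟨hij, rfl, hskipT⟩)
        (List.mem_singleton.mpr rfl)
        (fun x hx => hx)
        (by
          intro x hx hxf
          exact absurd hx hxf)
        (by
          intro x hx
          rw [List.mem_singleton] at hx
          subst hx
          exact Relation.ReflTransGen.refl)
        (by
          have : (h * w).toNat = h.toNat * w.toNat := by
            rcases hi with ⟨h1, h2⟩
            rcases hjmem with ⟨h3, h4⟩
            rw [Int.toNat_mul (by omega) (by omega)]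
          rw [this, List.length_singleton]
          omega)
    set C := pvSatLoop grid h w (pvGridAt grid (i, j)) t.1 ((h * w).toNat) [(i, j)] [(i, j)]
      with hdefC
    have hRAeq : pvRA grid h w [(i, j)] (· ∈ s.1) = pvRA grid h w [(i, j)] (· ∈ t.1) :=
      pvRA_ext (fun _ => Iff.rfl) hmemST
    have hlenC : (pvRA grid h w [(i, j)] (· ∈ s.1)).ncard = C.length := by
      rw [hRAeq]
      exact pv_length_eq_ncard hndC hmemC
    have hsepC : {u ∈ pvRA grid h w [(i, j)] (· ∈ s.1) | pvCrownAt cr u = true}.ncard =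
        C.countP (fun p => pvCrownAt cr p) := by
      rw [hRAeq]
      exact pv_countP_eq_ncard _ hndC hmemC
    have htiles : PySem.Set.len C = (C.length : Int) := by
      simp [PySem.Set.len]
    have hcrowns : C.foldl (fun n p => if pvCrownAt cr p then n + 1 else n) 0 =
        0 + (C.countP (fun p => pvCrownAt cr p) : Int) :=
      PySem.List.foldl_if_add_one _ _ _
    rw [hcomp0]
    simp only [heqA, ← hdefC, htiles, hcrowns, zero_add, hlenC, hsepC, hout]
    refine ⟨?_, hndA, PySem.Set.nodup_update t.1 C hndT, ?_, hinBA⟩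
    · rfl
    · intro x
      rw [hmemA x, PySem.Set.mem_update, hRAeq, ← hmemC x, hmemST x]

-- ===== VERDICT (by name: the statement is the Claim_ definition above) =====
theorem count_tiles_and_crowns_spec : Claim_equal_count_tiles_and_crowns := by
  intro grid cr _ _
  show count_tiles_and_crowns grid cr = count_tiles_and_crowns_alt grid cr
  rw [pv_A_eq, pv_B_eq, pv_w_eq]
  have hfuel : (PySem.List.len grid).toNat * (PySem.List.len (PySem.List.pyGetD grid 0 [])).toNat * 5 + 2 ≤
      grid.length * (grid.headD []).length * 5 + 2 := by
    have hg : grid[0]?.getD ([] : List Int) = grid.head?.getD [] := by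
      cases grid <;> simp
    simp [PySem.List.len_eq, PySem.List.pyGetD_zero, hg]
  refine (pv_foldl_rel
    (pvRel (PySem.List.len grid) (PySem.List.len (PySem.List.pyGetD grid 0 [])))
    _ _ _ ?_ _ _ ⟨rfl, List.nodup_nil, List.nodup_nil, fun _ => Iff.rfl, by intro x hx; cases hx⟩).1
  intro s t i himem hst
  exact pv_step_rel grid cr _ _ _ hfuel i (PySem.List.mem_pyRange_one.mp himem) s t hst
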